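-- pv_equiv track=rewrite | github.com/diogo2m/commips | commips/__main__.py | instruction_code_to_hex
-- ===== SOURCE A (Python) =====
-- def instruction_code_to_hex(code: list) -> list:
--
--     operations = {
--         "ADD": 1,
--         "ADDI": 2,
--         "SUB": 3,
--         "SUBI": 4,
--         "MULT": 5,
--         "MULTI": 6,
--         "AND": 7,
--         "ANDI": 8,
--         "OR": 9,
--         "ORI": 10,
--         "NOR": 11,
--         "NORI": 12,
--         "XOR": 13,
--         "XORI": 14,
--         "LW": 15,
--         "LWI": 16,
--         "SW": 17,
--         "SWI": 18,
--         "J": 19,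
--         "JI": 20,
--         "JZ": 21,
--         "JZI": 22,
--     }
--
--     memory_address = 0
--
--     registers = {}
--     new_code = []
--
--     for line in code:
--         new_line = ""
--         line = line.split(" ")
--         new_line += hex(operations[line[0]])
--         for word in line[1:]:
--             if word:
--                 if word[0] == '$':
--                     if word not in registers:
--                         registers[word] = memory_address
--                         memory_address += 1
--                     new_line += f' {hex(registers[word])}'
--                 elif word[0] == "#":
--                     new_line += f' {hex(int(word[1:].rsplit(",")[0]))}'
--
--         new_code.append(new_line)
--
--     return new_code
-- ===== SOURCE B (Python) =====
-- def instruction_code_to_hex(code: list) -> list: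
--
--     operations = {
--         "ADD": 1, "ADDI": 2, "SUB": 3, "SUBI": 4, "MULT": 5, "MULTI": 6,
--         "AND": 7, "ANDI": 8, "OR": 9, "ORI": 10, "NOR": 11, "NORI": 12,
--         "XOR": 13, "XORI": 14, "LW": 15, "LWI": 16, "SW": 17, "SWI": 18,
--         "J": 19, "JI": 20, "JZ": 21, "JZI": 22,
--     }
--
--     # pass 1: build the full register symbol table in first-seen order
--     registers = {}
--     for line in code:
--         for word in line.split(" ")[1:]:
--             if word and word[0] == '$' and word not in registers:
--                 registers[word] = len(registers)
--
--     # pass 2: encode each line against the frozen table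
--     def encode(line):
--         words = line.split(" ")
--         parts = [hex(operations[words[0]])]
--         for word in words[1:]:
--             if word:
--                 if word[0] == '$':
--                     parts.append(hex(registers[word]))
--                 elif word[0] == '#':
--                     parts.append(hex(int(word[1:].rsplit(",")[0])))
--         return " ".join(parts)
--
--     return [encode(line) for line in code]
-- ===== Notes on version B (the rewrite author's own statement) =====
-- stated objective: alternative
-- what changed: A fuses register-table construction and encoding in one pass with interleaved mutable state; B first builds the complete register symbol table in a separate pass (address = table size at first sight) and then encodes every line against the frozen table, collecting hex parts per line and joining them, returning the list via a map over the lines.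
import Mathlib
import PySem

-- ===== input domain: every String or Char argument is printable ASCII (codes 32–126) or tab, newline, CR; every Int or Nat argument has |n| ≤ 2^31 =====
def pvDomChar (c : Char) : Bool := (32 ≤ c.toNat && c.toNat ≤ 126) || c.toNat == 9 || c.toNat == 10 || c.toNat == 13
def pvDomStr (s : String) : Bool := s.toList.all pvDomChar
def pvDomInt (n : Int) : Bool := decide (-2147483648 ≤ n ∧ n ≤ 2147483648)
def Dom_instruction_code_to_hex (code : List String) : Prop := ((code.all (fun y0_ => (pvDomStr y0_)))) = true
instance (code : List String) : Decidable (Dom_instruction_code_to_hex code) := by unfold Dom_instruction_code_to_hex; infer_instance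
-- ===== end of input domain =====

-- B replaces A's single pass with interleaved symbol-table growth by two passes — build the full
-- register table first (addresses = first-seen order), then encode every line against the frozen
-- table with a join over collected parts (objective: alternative decomposition, same cost).

-- shared helpers: the Python built-ins both sources call
-- hex(n): exact port of Python's hex() — "0x"+lowercase digits, "-0x…" for negatives
def pyHex (n : Int) : String :=
  if n < 0 then "-0x" ++ String.ofList (Nat.toDigits 16 (-n).toNat)
  else "0x" ++ String.ofList (Nat.toDigits 16 n.toNat)

-- s.split(sep): exact for sep ≠ "" (both sources split only on " " and ","); PySem.Str.split? is none only for sep = ""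
def pySplit (s sep : String) : List String := (PySem.Str.split? s sep).getD []

-- the shared `operations` literal dict
def pvOps : PySem.Dict String Int := PySem.Dict.ofList
  [("ADD", 1), ("ADDI", 2), ("SUB", 3), ("SUBI", 4), ("MULT", 5), ("MULTI", 6),
   ("AND", 7), ("ANDI", 8), ("OR", 9), ("ORI", 10), ("NOR", 11), ("NORI", 12),
   ("XOR", 13), ("XORI", 14), ("LW", 15), ("LWI", 16), ("SW", 17), ("SWI", 18),
   ("J", 19), ("JI", 20), ("JZ", 21), ("JZI", 22)]

-- int(word[1:].rsplit(",")[0]); the .getD 0 is unreachable under Pre_ (ValueError excluded)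
def pvImm (w : String) : Int :=
  (PySem.Int.ofStr? (PySem.List.pyGetD (pySplit (PySem.Str.slice w (some 1) none) ",") 0 "")).getD 0

-- ===== PORT A =====
-- A's inner word loop: state (registers, memory_address, new_line)
def pvWordA (st : PySem.Dict String Int × Int × String) (w : String) :
    PySem.Dict String Int × Int × String :=
  let (regs, mem, nl) := st
  if w = "" then (regs, mem, nl)
  else if PySem.Str.pyGet? w 0 = some '$' then
    let rm : PySem.Dict String Int × Int :=
      if regs.contains w then (regs, mem) else (regs.insert w mem, mem + 1)
    (rm.1, rm.2, nl ++ " " ++ pyHex (rm.1.getD w 0))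
  else if PySem.Str.pyGet? w 0 = some '#' then (regs, mem, nl ++ " " ++ pyHex (pvImm w))
  else (regs, mem, nl)

-- A's line loop: state (registers, memory_address, new_code); operations[line[0]] via getD,
-- unreachable default under Pre_ (KeyError excluded)
def pvLineA (st : PySem.Dict String Int × Int × List String) (line : String) :
    PySem.Dict String Int × Int × List String :=
  let ws := pySplit line " "
  let r := (ws.drop 1).foldl pvWordA (st.1, st.2.1, pyHex (pvOps.getD (PySem.List.pyGetD ws 0 "") 0))
  (r.1, r.2.1, st.2.2 ++ [r.2.2])

def instruction_code_to_hex (code : List String) : List String :=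
  (code.foldl pvLineA (PySem.Dict.empty, 0, [])).2.2

-- ===== PORT B =====
-- pass 1: record every fresh '$'-word with the next address (= current table size)
def pvBuildW (regs : PySem.Dict String Int) (w : String) : PySem.Dict String Int :=
  if w ≠ "" ∧ PySem.Str.pyGet? w 0 = some '$' ∧ regs.contains w = false
  then regs.insert w (regs.size : Int) else regs

def pvBuildLine (regs : PySem.Dict String Int) (line : String) : PySem.Dict String Int :=
  ((pySplit line " ").drop 1).foldl pvBuildW regs

def pvSymtab (code : List String) : PySem.Dict String Int :=
  code.foldl pvBuildLine PySem.Dict.empty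

-- pass 2: collect the hex parts of one line, reading the frozen table R
def pvEmitW (R : PySem.Dict String Int) (parts : List String) (w : String) : List String :=
  if w = "" then parts
  else if PySem.Str.pyGet? w 0 = some '$' then parts ++ [pyHex (R.getD w 0)]
  else if PySem.Str.pyGet? w 0 = some '#' then parts ++ [pyHex (pvImm w)]
  else parts

def pvEncode (R : PySem.Dict String Int) (line : String) : String :=
  let ws := pySplit line " "
  PySem.Str.join " " ((ws.drop 1).foldl (pvEmitW R)
    [pyHex (pvOps.getD (PySem.List.pyGetD ws 0 "") 0)])

def instruction_code_to_hex_alt (code : List String) : List String :=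
  code.map (pvEncode (pvSymtab code))

-- ===== PRECONDITION & SPEC =====
-- Pre_ excludes exactly the inputs where Python A raises: a line whose first word is not an
-- operation name (KeyError), or a '#'-word whose immediate does not parse as an int (ValueError).
def Pre_instruction_code_to_hex (code : List String) : Prop :=
  ∀ line ∈ code,
    pvOps.contains (PySem.List.pyGetD (pySplit line " ") 0 "") = true ∧
    ∀ w ∈ (pySplit line " ").drop 1, w ≠ "" → PySem.Str.pyGet? w 0 = some '#' →
      (PySem.Int.ofStr? (PySem.List.pyGetD (pySplit (PySem.Str.slice w (some 1) none) ",") 0 "")).isSome = true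
instance (code : List String) : Decidable (Pre_instruction_code_to_hex code) := by
  unfold Pre_instruction_code_to_hex; infer_instance

def pvWitness_instruction_code_to_hex : List String := ["ADD $t0 $t1 $t0", "ADDI $t0 #12,"]

def Spec_instruction_code_to_hex (code : List String) (out : List String) : Prop :=
  out = instruction_code_to_hex_alt code
instance (code : List String) (out : List String) : Decidable (Spec_instruction_code_to_hex code out) := by
  unfold Spec_instruction_code_to_hex; infer_instance

-- ===== CLAIM (what is proved, stated in full; the proofs are below) =====
def Claim_equal_instruction_code_to_hex : Prop := ∀ (code : List String), Dom_instruction_code_to_hex code → Pre_instruction_code_to_hex code → Spec_instruction_code_to_hex code (instruction_code_to_hex code)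

-- ===== LEMMAS AND PROOFS =====

-- r₂ extends r₁: every key present in r₁ has the same lookup in r₂
def pvExt (r₁ r₂ : PySem.Dict String Int) : Prop :=
  ∀ k, r₁.contains k = true → r₂.get? k = r₁.get? k

theorem pvExt_refl (r : PySem.Dict String Int) : pvExt r r := fun _ _ => rfl

theorem pvExt_trans {r₁ r₂ r₃ : PySem.Dict String Int} (h12 : pvExt r₁ r₂) (h23 : pvExt r₂ r₃) :
    pvExt r₁ r₃ := by
  intro k hk
  have h2 : r₂.contains k = true := by
    have := h12 k hk
    rw [PySem.Dict.contains_eq_isSome_get?] at hk ⊢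
    rw [this]; exact hk
  rw [h23 k h2, h12 k hk]

theorem pvExt_buildW (regs : PySem.Dict String Int) (w : String) :
    pvExt regs (pvBuildW regs w) := by
  unfold pvBuildW
  split
  · rename_i h
    intro k hk
    exact PySem.Dict.get?_insert_of_ne _ _ (by rintro rfl; rw [hk] at h; simp at h)
  · exact pvExt_refl regs

theorem pvExt_foldl_buildW (ws : List String) :
    ∀ regs, pvExt regs (ws.foldl pvBuildW regs) := by
  induction ws with
  | nil => intro regs; exact pvExt_refl regs
  | cons w ws ih =>
    intro regs
    exact pvExt_trans (pvExt_buildW regs w) (ih (pvBuildW regs w))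

theorem pvExt_foldl_buildLine (cs : List String) :
    ∀ regs, pvExt regs (cs.foldl pvBuildLine regs) := by
  induction cs with
  | nil => intro regs; exact pvExt_refl regs
  | cons l cs ih =>
    intro regs
    exact pvExt_trans (pvExt_foldl_buildW _ regs) (ih (pvBuildLine regs l))

-- the string A appends for one word, read off a table R
def pvEmitS (R : PySem.Dict String Int) (w : String) : String :=
  if w = "" then ""
  else if PySem.Str.pyGet? w 0 = some '$' then " " ++ pyHex (R.getD w 0)
  else if PySem.Str.pyGet? w 0 = some '#' then " " ++ pyHex (pvImm w)
  else ""

-- one step of A's word loop, against B's table builder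
theorem pvWordA_step (regs : PySem.Dict String Int) (nl w : String) :
    (pvWordA (regs, (regs.size : Int), nl) w).1 = pvBuildW regs w ∧
    (pvWordA (regs, (regs.size : Int), nl) w).2.1 = ((pvBuildW regs w).size : Int) ∧
    ∀ R, pvExt (pvBuildW regs w) R →
      (pvWordA (regs, (regs.size : Int), nl) w).2.2 = nl ++ pvEmitS R w := by
  by_cases hw : w = ""
  · simp [pvWordA, pvBuildW, pvEmitS, hw, String.append_empty]
  · by_cases hd : PySem.List.pyGet? w.toList 0 = some '$'
    · by_cases hc : regs.contains w
      · have hB : pvBuildW regs w = regs := by simp [pvBuildW, hc]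
        refine ⟨by simp [pvWordA, hw, hd, hc, hB], by simp [pvWordA, hw, hd, hc, hB], ?_⟩
        intro R hR
        have hR' := hR w (by rw [hB]; exact hc)
        rw [hB] at hR'
        have hg : R.getD w 0 = regs.getD w 0 := by
          rw [PySem.Dict.getD_eq_get?_getD, PySem.Dict.getD_eq_get?_getD, hR']
        simp [pvWordA, pvEmitS, hw, hd, hc, hg, String.append_assoc]
      · have hc' : regs.contains w = false := by simpa using hc
        have hB : pvBuildW regs w = regs.insert w (regs.size : Int) := by
          simp [pvBuildW, hw, hd, hc']
        refine ⟨by simp [pvWordA, hw, hd, hc', hB], ?_, ?_⟩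
        · simp [pvWordA, hw, hd, hc', hB, PySem.Dict.size_insert]
        · intro R hR
          have hR' := hR w (by rw [hB]; exact PySem.Dict.contains_insert_self regs w _)
          rw [hB, PySem.Dict.get?_insert_self] at hR'
          have hg : R.getD w 0 = (regs.size : Int) := by
            rw [PySem.Dict.getD_eq_get?_getD, hR']; rfl
          simp [pvWordA, pvEmitS, hw, hd, hc', hg, String.append_assoc]
    · by_cases hh : PySem.List.pyGet? w.toList 0 = some '#' <;>
        simp [pvWordA, pvBuildW, pvEmitS, hw, hd, hh, String.append_empty, String.append_assoc]

-- A's word loop over a whole line, against B's builder and emitter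
theorem pvWordsA_fold (ws : List String) :
    ∀ regs nl,
      (ws.foldl pvWordA (regs, (regs.size : Int), nl)).1 = ws.foldl pvBuildW regs ∧
      (ws.foldl pvWordA (regs, (regs.size : Int), nl)).2.1 = ((ws.foldl pvBuildW regs).size : Int) ∧
      ∀ R, pvExt (ws.foldl pvBuildW regs) R →
        (ws.foldl pvWordA (regs, (regs.size : Int), nl)).2.2 =
          ws.foldl (fun s w => s ++ pvEmitS R w) nl := by
  induction ws with
  | nil => intro regs nl; exact ⟨rfl, rfl, fun _ _ => rfl⟩
  | cons w ws ih =>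
    intro regs nl
    obtain ⟨h1, h2, h3⟩ := pvWordA_step regs nl w
    have hstep : pvWordA (regs, (regs.size : Int), nl) w =
        (pvBuildW regs w, ((pvBuildW regs w).size : Int),
          (pvWordA (regs, (regs.size : Int), nl) w).2.2) := by
      rw [Prod.ext_iff]; exact ⟨h1, by rw [Prod.ext_iff]; exact ⟨h2, rfl⟩⟩
    obtain ⟨ih1, ih2, ih3⟩ := ih (pvBuildW regs w) ((pvWordA (regs, (regs.size : Int), nl) w).2.2)
    refine ⟨?_, ?_, ?_⟩
    · rw [List.foldl_cons, List.foldl_cons, hstep]; exact ih1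
    · rw [List.foldl_cons, List.foldl_cons, hstep]; exact ih2
    · intro R hR
      have hR' : pvExt (pvBuildW regs w) R :=
        pvExt_trans (pvExt_foldl_buildW ws (pvBuildW regs w)) hR
      rw [List.foldl_cons, hstep, ih3 R hR, List.foldl_cons, ← h3 R hR']

-- joining collected parts = folding string concatenation (B's join vs A's "+=")
theorem pvCharsJoin_snoc (M : List (List Char)) : ∀ (p e : List Char),
    PySem.Chars.join [' '] (p :: (M ++ [e])) = PySem.Chars.join [' '] (p :: M) ++ (' ' :: e) := by
  induction M with
  | nil =>
    intro p e
    rw [List.nil_append, PySem.Chars.join_cons_cons, PySem.Chars.join_singleton,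
      PySem.Chars.join_singleton, List.append_assoc]
    rfl
  | cons q M ih =>
    intro p e
    rw [List.cons_append, PySem.Chars.join_cons_cons, ih q e, PySem.Chars.join_cons_cons]
    simp [List.append_assoc]

theorem pvJoin_snoc (parts : List String) (p e : String) :
    PySem.Str.join " " (p :: (parts ++ [e])) = PySem.Str.join " " (p :: parts) ++ (" " ++ e) := by
  apply String.toList_inj.mp
  simp only [PySem.Str.toList_join, List.map_cons, List.map_append, String.toList_append]
  have := pvCharsJoin_snoc (parts.map String.toList) p.toList e.toList
  simpa using this

theorem pvJoin_foldl_emit (R : PySem.Dict String Int) (ws : List String) :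
    ∀ (p : String) (parts : List String),
      PySem.Str.join " " (ws.foldl (pvEmitW R) (p :: parts)) =
        ws.foldl (fun s w => s ++ pvEmitS R w) (PySem.Str.join " " (p :: parts)) := by
  induction ws with
  | nil => intro p parts; rfl
  | cons w ws ih =>
    intro p parts
    simp only [List.foldl_cons]
    by_cases hw : w = ""
    · have e1 : pvEmitW R (p :: parts) w = p :: parts := by simp [pvEmitW, hw]
      have e2 : pvEmitS R w = "" := by simp [pvEmitS, hw]
      rw [e1]; simp only [e2, String.append_empty]; exact ih p parts
    · by_cases hd : PySem.List.pyGet? w.toList 0 = some '$'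
      · have e1 : pvEmitW R (p :: parts) w = p :: (parts ++ [pyHex (R.getD w 0)]) := by
          simp [pvEmitW, hw, hd]
        have e2 : pvEmitS R w = " " ++ pyHex (R.getD w 0) := by simp [pvEmitS, hw, hd]
        rw [e1, ih p (parts ++ [pyHex (R.getD w 0)]), pvJoin_snoc]
        simp only [e2]
      · by_cases hh : PySem.List.pyGet? w.toList 0 = some '#'
        · have e1 : pvEmitW R (p :: parts) w = p :: (parts ++ [pyHex (pvImm w)]) := by
            simp [pvEmitW, hw, hh]
          have e2 : pvEmitS R w = " " ++ pyHex (pvImm w) := by simp [pvEmitS, hw, hh]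
          rw [e1, ih p (parts ++ [pyHex (pvImm w)]), pvJoin_snoc]
          simp only [e2]
        · have e1 : pvEmitW R (p :: parts) w = p :: parts := by simp [pvEmitW, hw, hd, hh]
          have e2 : pvEmitS R w = "" := by simp [pvEmitS, hw, hd, hh]
          rw [e1]; simp only [e2, String.append_empty]; exact ih p parts

theorem pvJoin_singleton (p : String) : PySem.Str.join " " [p] = p := by
  apply String.toList_inj.mp
  simp [PySem.Str.toList_join, PySem.Chars.join_singleton]

-- main induction: A's fused pass, started at any table, equals B's two passes over the rest
theorem pvMain (cs : List String) :
    ∀ (regs : PySem.Dict String Int) (acc : List String),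
      (cs.foldl pvLineA (regs, (regs.size : Int), acc)).2.2 =
        acc ++ cs.map (pvEncode (cs.foldl pvBuildLine regs)) := by
  induction cs with
  | nil => intro regs acc; simp
  | cons l cs ih =>
    intro regs acc
    obtain ⟨h1, h2, h3⟩ := pvWordsA_fold ((pySplit l " ").drop 1) regs
      (pyHex (pvOps.getD (PySem.List.pyGetD (pySplit l " ") 0 "") 0))
    set h0 := pyHex (pvOps.getD (PySem.List.pyGetD (pySplit l " ") 0 "") 0) with hh0
    set R := cs.foldl pvBuildLine (pvBuildLine regs l) with hR
    have hext : pvExt (pvBuildLine regs l) R := pvExt_foldl_buildLine cs _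
    have hnl := h3 R hext
    have hline : pvLineA (regs, (regs.size : Int), acc) l =
        (pvBuildLine regs l, ((pvBuildLine regs l).size : Int),
          acc ++ [((pySplit l " ").drop 1).foldl (fun s w => s ++ pvEmitS R w) h0]) := by
      unfold pvLineA
      rw [Prod.ext_iff]
      refine ⟨h1, ?_⟩
      rw [Prod.ext_iff]
      exact ⟨h2, by simp only [pvBuildLine] at *; rw [hnl]⟩
    have henc : pvEncode R l =
        ((pySplit l " ").drop 1).foldl (fun s w => s ++ pvEmitS R w) h0 := by
      simp only [pvEncode]
      rw [← hh0, pvJoin_foldl_emit R _ h0 [], pvJoin_singleton]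
    simp only [List.foldl_cons, List.map_cons, hline]
    rw [ih (pvBuildLine regs l) (acc ++ [_])]
    simp [henc, ← hR]

-- ===== VERDICT (by name: the statement is the Claim_ definition above) =====
theorem instruction_code_to_hex_spec : Claim_equal_instruction_code_to_hex := by
  intro code _ _
  unfold Spec_instruction_code_to_hex instruction_code_to_hex instruction_code_to_hex_alt pvSymtab
  have h0 : (0 : Int) = ((PySem.Dict.empty : PySem.Dict String Int).size : Int) := by
    simp [PySem.Dict.size_empty]
  rw [h0, pvMain code PySem.Dict.empty []]
  simp
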